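-- pv_equiv track=rewrite | github.com/edwardtavila-boop/eta-engine | scripts/vps_failover_drill.py | _env_option_satisfied
-- ===== SOURCE A (Python) =====
-- def _env_option_satisfied(key_state: dict[str, bool], options: tuple[str, ...]) -> bool:
--     """Return True when any exact key or prefix option is populated."""
--     for option in options:
--         if option.endswith("_"):
--             if any(key.startswith(option) and has_value for key, has_value in key_state.items()):
--                 return True
--         elif key_state.get(option):
--             return True
--     return False
-- ===== SOURCE B (Python) =====
-- def _env_option_satisfied(key_state: dict[str, bool], options: tuple[str, ...]) -> bool:
--     """Return True when any exact key or prefix option is populated."""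
--     exact = {o for o in options if not o.endswith("_")}
--     prefixes = tuple(o for o in options if o.endswith("_"))
--     for key, has_value in key_state.items():
--         if not has_value:
--             continue
--         if key in exact or any(key.startswith(p) for p in prefixes):
--             return True
--     return False
-- ===== Notes on version B (the rewrite author's own statement) =====
-- stated objective: alternative
-- what changed: B pre-splits options into an exact-key set and a prefix tuple, then makes a single keys-outer pass over key_state instead of A's options-outer loop that rescans all items for every prefix option.
import Mathlib
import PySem

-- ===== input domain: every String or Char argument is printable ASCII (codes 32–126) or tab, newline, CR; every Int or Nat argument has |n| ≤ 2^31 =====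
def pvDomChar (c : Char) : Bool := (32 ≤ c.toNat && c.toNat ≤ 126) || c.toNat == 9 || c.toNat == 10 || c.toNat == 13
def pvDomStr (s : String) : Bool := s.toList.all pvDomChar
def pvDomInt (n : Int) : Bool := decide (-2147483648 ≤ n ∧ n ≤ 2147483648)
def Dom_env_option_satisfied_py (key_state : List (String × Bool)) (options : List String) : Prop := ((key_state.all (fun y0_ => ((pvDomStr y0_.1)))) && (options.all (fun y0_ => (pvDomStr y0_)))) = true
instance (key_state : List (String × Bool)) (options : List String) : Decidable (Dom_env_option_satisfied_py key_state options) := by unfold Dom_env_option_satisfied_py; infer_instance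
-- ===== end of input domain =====

-- B pre-splits options into an exact-key set and a prefix list, then makes a single
-- keys-outer pass over key_state (objective: alternative decomposition, same cost class).

-- ===== PORT A =====
def env_option_satisfied_py (key_state : List (String × Bool)) (options : List String) : Bool :=
  options.any (fun option =>
    if PySem.Str.endswith option "_" then
      key_state.any (fun kv => PySem.Str.startswith kv.1 option && kv.2)
    else
      (key_state.lookup option).getD false)

-- ===== PORT B =====
def env_option_satisfied_py_alt (key_state : List (String × Bool)) (options : List String) : Bool :=
  let exact : PySem.Set String := PySem.Set.ofList (options.filter (fun o => !(PySem.Str.endswith o "_")))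
  let prefixes : List String := options.filter (fun o => PySem.Str.endswith o "_")
  key_state.any (fun kv =>
    kv.2 && (PySem.Set.contains exact kv.1 || prefixes.any (fun p => PySem.Str.startswith kv.1 p)))

-- ===== PRECONDITION & SPEC =====
-- Pre_ restricts the association list to distinct keys: a Python dict cannot hold
-- duplicate keys, so lists with duplicates do not represent any input of A.
def Pre_env_option_satisfied_py (key_state : List (String × Bool)) (options : List String) : Prop :=
  (key_state.map Prod.fst).Nodup
instance (key_state : List (String × Bool)) (options : List String) : Decidable (Pre_env_option_satisfied_py key_state options) := by unfold Pre_env_option_satisfied_py; infer_instance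
def pvWitness_env_option_satisfied_py : (List (String × Bool)) × List String :=
  ([("ETA_TOKEN", true), ("OTHER", false)], ["ETA_", "PATH"])

def Spec_env_option_satisfied_py (key_state : List (String × Bool)) (options : List String) (out : Bool) : Prop := out = env_option_satisfied_py_alt key_state options
instance (key_state : List (String × Bool)) (options : List String) (out : Bool) : Decidable (Spec_env_option_satisfied_py key_state options out) := by unfold Spec_env_option_satisfied_py; infer_instance

-- ===== CLAIM (what is proved, stated in full; the proofs are below) =====
def Claim_equal_env_option_satisfied_py : Prop := ∀ (key_state : List (String × Bool)) (options : List String), Dom_env_option_satisfied_py key_state options → Pre_env_option_satisfied_py key_state options → Spec_env_option_satisfied_py key_state options (env_option_satisfied_py key_state options)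

-- ===== LEMMAS AND PROOFS =====

-- With distinct keys, the dict lookup with default false is true iff (k, true) is an entry.
lemma getD_true_iff (d : List (String × Bool)) (k : String)
    (h : (d.map Prod.fst).Nodup) : (d.lookup k).getD false = true ↔ (k, true) ∈ d := by
  induction d with
  | nil => simp [List.lookup]
  | cons p t ih =>
    obtain ⟨a, b⟩ := p
    simp only [List.map_cons, List.nodup_cons] at h
    by_cases hk : k = a
    · subst hk
      cases b with
      | true => simp [List.lookup]
      | false =>
        simp only [List.lookup, beq_self_eq_true, Option.getD_some, List.mem_cons]
        constructor
        · intro hfalse; exact absurd hfalse (by simp)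
        · rintro (hpair | hmem)
          · cases hpair
          · exact absurd (show k ∈ t.map Prod.fst from List.mem_map.mpr ⟨(k, true), hmem, rfl⟩) h.1
    · have hbeq : (k == a) = false := by simpa using hk
      simp [List.lookup, hbeq, ih h.2, hk]

lemma env_option_satisfied_py_spec' (key_state : List (String × Bool)) (options : List String)
    (hpre : (key_state.map Prod.fst).Nodup) :
    env_option_satisfied_py key_state options = env_option_satisfied_py_alt key_state options := by
  rw [Bool.eq_iff_iff]
  simp only [env_option_satisfied_py, env_option_satisfied_py_alt, List.any_eq_true,
    Bool.and_eq_true, Bool.or_eq_true, List.mem_filter, PySem.Set.contains,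
    List.contains_iff_mem, PySem.Set.mem_ofList, List.mem_filter]
  constructor
  · rintro ⟨o, ho, hcond⟩
    by_cases he : PySem.Str.endswith o "_" = true
    · rw [if_pos he] at hcond
      simp only [List.any_eq_true, Bool.and_eq_true] at hcond
      obtain ⟨kv, hmem, hstart, hval⟩ := hcond
      exact ⟨kv, hmem, hval, Or.inr ⟨o, ⟨ho, he⟩, hstart⟩⟩
    · rw [if_neg he] at hcond
      have hk : (o, true) ∈ key_state := (getD_true_iff key_state o hpre).mp hcond
      exact ⟨(o, true), hk, rfl, Or.inl ⟨ho, by simpa using he⟩⟩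
  · rintro ⟨kv, hkv, hval, hor⟩
    rcases hor with ⟨ho, hne⟩ | ⟨p, ⟨hp, hpe⟩, hstart⟩
    · refine ⟨kv.1, ho, ?_⟩
      rw [if_neg (by simpa using hne)]
      refine (getD_true_iff key_state kv.1 hpre).mpr ?_
      have : kv = (kv.1, true) := by
        obtain ⟨a, b⟩ := kv; cases hval; rfl
      rwa [this] at hkv
    · refine ⟨p, hp, ?_⟩
      rw [if_pos hpe]
      exact List.any_eq_true.mpr ⟨kv, hkv, by simp only [Bool.and_eq_true]; exact ⟨hstart, hval⟩⟩

-- ===== VERDICT (by name: the statement is the Claim_ definition above) =====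
theorem env_option_satisfied_py_spec : Claim_equal_env_option_satisfied_py := by
  intro ks opts _ hpre
  exact env_option_satisfied_py_spec' ks opts hpre
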